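-- pv_equiv track=rewrite | github.com/bcimring/TimeTable-Creator | Classroom_Schedule_Class.py | addMandateClasses
-- ===== SOURCE A (Python) =====
-- def addMandateClasses(number_classes, remain, mandate):
--     for mand_course in mandate:
--         for course in remain:
--             if ((mand_course+'D' == course) and (remain[course][0] != 0)):
--                 number_classes[course][0] += 1
--                 remain[course][0] = 0
--
--             if ((mand_course+'P' == course) and (remain[course][0] != 0)):
--                 number_classes[course][0] += 1
--                 remain[course][0] = 0
--
--     return number_classes,remain
-- ===== SOURCE B (Python) =====
-- def addMandateClasses(number_classes, remain, mandate):
--     # Two stages instead of A's nested mandate x remain equality scan: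
--     # (1) compute the list of courses that fire, using a hash set of mandated
--     #     stems (a course fires iff it is some mandated course + 'D'/'P' and
--     #     its remain count is nonzero); (2) apply both updates to each fired
--     #     course.  Mutates the two dicts in place exactly like A and returns them.
--     mand = set(mandate)
--     fired = [c for c in remain
--              if (c.endswith('D') or c.endswith('P'))
--              and c[:-1] in mand
--              and remain[c][0] != 0]
--     for c in fired:
--         number_classes[c][0] += 1
--         remain[c][0] = 0
--     return number_classes, remain
-- ===== Notes on version B (the rewrite author's own statement) =====
-- stated objective: faster
-- what changed: Replaces the nested mandate-by-remain equality scan with a two-stage pass: first build the list of fired courses by one filter over remain's keys against a hash set of mandated stems, then apply the two updates to exactly those courses.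
import Mathlib
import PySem

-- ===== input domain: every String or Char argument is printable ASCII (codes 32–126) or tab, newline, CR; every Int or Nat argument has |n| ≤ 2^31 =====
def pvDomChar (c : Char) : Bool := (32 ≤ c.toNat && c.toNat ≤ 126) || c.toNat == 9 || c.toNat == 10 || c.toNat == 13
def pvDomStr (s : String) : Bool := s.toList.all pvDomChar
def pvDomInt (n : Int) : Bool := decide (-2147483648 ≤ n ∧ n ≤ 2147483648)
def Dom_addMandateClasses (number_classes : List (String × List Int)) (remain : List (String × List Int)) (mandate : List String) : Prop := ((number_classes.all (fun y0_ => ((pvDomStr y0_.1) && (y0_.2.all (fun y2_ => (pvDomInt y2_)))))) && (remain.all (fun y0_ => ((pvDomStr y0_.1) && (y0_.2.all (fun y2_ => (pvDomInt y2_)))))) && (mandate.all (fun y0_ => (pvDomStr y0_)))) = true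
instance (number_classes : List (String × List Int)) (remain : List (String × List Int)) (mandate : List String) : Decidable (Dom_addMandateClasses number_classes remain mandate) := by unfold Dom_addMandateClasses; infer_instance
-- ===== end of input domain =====

-- B replaces A's nested mandate×remain equality scan by two stages: a single filter over
-- remain's keys against a set of mandated stems selecting the fired courses, then one update
-- pass over that list (faster). Both Pythons mutate the two dicts in place in the same way
-- and return them, so the proved return-value equivalence covers the side effect too.

-- shared dict primitives (a Python dict is an assoc list, first-match lookup)
-- d[k] for lookup only; [] where Python raises KeyError (excluded by Pre_)
def pvGet (d : List (String × List Int)) (k : String) : List Int :=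
  match d with
  | [] => []
  | (k', v) :: t => if k' = k then v else pvGet t k
-- v[0] as an Int; 0 where Python raises IndexError (excluded by Pre_)
def pvHead (v : List Int) : Int := PySem.List.pyGetD v 0 0
-- v[0] += 1
def pvBumpV (v : List Int) : List Int := PySem.List.pySetD v 0 (PySem.List.pyGetD v 0 0 + 1)
-- v[0] = 0
def pvZeroV (v : List Int) : List Int := PySem.List.pySetD v 0 0
-- mutate the entry of key k in place: d[k] := t d[k]
def pvUpd (d : List (String × List Int)) (k : String) (t : List Int → List Int) : List (String × List Int) :=
  match d with
  | [] => []
  | (k', v) :: tl => if k' = k then (k', t v) :: tl else (k', v) :: pvUpd tl k t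

-- ===== PORT A =====
-- body of A's inner loop: the two sequential ifs for one (mand_course, course) pair.
-- Python string equality 'mand_course+"D" == course' is exactly code-point list equality.
def addMandateClassesStep (m : String) (st : (List (String × List Int)) × (List (String × List Int))) (c : String) : (List (String × List Int)) × (List (String × List Int)) :=
  let st1 := if (m.toList ++ ['D'] == c.toList) && (pvHead (pvGet st.2 c) != 0)
             then (pvUpd st.1 c pvBumpV, pvUpd st.2 c pvZeroV) else st
  if (m.toList ++ ['P'] == c.toList) && (pvHead (pvGet st1.2 c) != 0)
  then (pvUpd st1.1 c pvBumpV, pvUpd st1.2 c pvZeroV) else st1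

-- 'for course in remain' iterates the keys, which the loop body never adds or removes
def addMandateClasses (number_classes : List (String × List Int)) (remain : List (String × List Int)) (mandate : List String) : (List (String × List Int)) × (List (String × List Int)) :=
  mandate.foldl (fun st m => (st.2.map Prod.fst).foldl (addMandateClassesStep m) st)
    (number_classes, remain)

-- ===== PORT B =====
-- stage 1 of Source B: the fired-course list comprehension over remain's keys
def addMandateClassesFired (remain : List (String × List Int)) (mset : PySem.Set String) : List String :=
  (remain.map Prod.fst).filter (fun c =>
    (PySem.Str.endswith c "D" || PySem.Str.endswith c "P")
    && PySem.Set.contains mset (PySem.Str.slice c none (some (-1)))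
    && (pvHead (pvGet remain c) != 0))

def addMandateClasses_alt (number_classes : List (String × List Int)) (remain : List (String × List Int)) (mandate : List String) : (List (String × List Int)) × (List (String × List Int)) :=
  let fired := addMandateClassesFired remain (PySem.Set.ofList mandate)
  -- stage 2 of Source B: 'for c in fired: number_classes[c][0] += 1; remain[c][0] = 0'
  fired.foldl (fun st c => (pvUpd st.1 c pvBumpV, pvUpd st.2 c pvZeroV)) (number_classes, remain)

-- ===== PRECONDITION & SPEC =====
-- 'course' is touched by A iff it is mand_course+'D' or mand_course+'P' for a mandated course
def pvAffected (mandate : List String) (c : String) : Bool :=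
  mandate.any (fun m => (m.toList ++ ['D'] == c.toList) || (m.toList ++ ['P'] == c.toList))

-- Pre_ = the inputs on which the Python A returns normally: the two assoc lists model
-- Python dicts, whose keys are unique (Nodup); and for every touched course A reads
-- remain[course][0] (IndexError on an empty value list) and, when that is nonzero, reads
-- number_classes[course][0] (KeyError / IndexError when the key is absent or its list empty).
def Pre_addMandateClasses (number_classes : List (String × List Int)) (remain : List (String × List Int)) (mandate : List String) : Prop :=
  (number_classes.map Prod.fst).Nodup ∧ (remain.map Prod.fst).Nodup ∧
  ∀ p ∈ remain, pvAffected mandate p.1 = true →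
    pvGet remain p.1 ≠ [] ∧
    (pvHead (pvGet remain p.1) ≠ 0 →
      (number_classes.map Prod.fst).contains p.1 = true ∧ pvGet number_classes p.1 ≠ [])
instance (number_classes : List (String × List Int)) (remain : List (String × List Int)) (mandate : List String) : Decidable (Pre_addMandateClasses number_classes remain mandate) := by unfold Pre_addMandateClasses; infer_instance

def pvWitness_addMandateClasses : (List (String × List Int)) × (List (String × List Int)) × List String :=
  ([("aD", [2]), ("b", [])], [("aD", [3]), ("b", [1])], ["a"])

def Spec_addMandateClasses (number_classes : List (String × List Int)) (remain : List (String × List Int)) (mandate : List String) (out : (List (String × List Int)) × (List (String × List Int))) : Prop := out = addMandateClasses_alt number_classes remain mandate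
instance (number_classes : List (String × List Int)) (remain : List (String × List Int)) (mandate : List String) (out : (List (String × List Int)) × (List (String × List Int))) : Decidable (Spec_addMandateClasses number_classes remain mandate out) := by unfold Spec_addMandateClasses; infer_instance

-- ===== CLAIM (what is proved, stated in full; the proofs are below) =====
def Claim_equal_addMandateClasses : Prop := ∀ (number_classes : List (String × List Int)) (remain : List (String × List Int)) (mandate : List String), Dom_addMandateClasses number_classes remain mandate → Pre_addMandateClasses number_classes remain mandate → Spec_addMandateClasses number_classes remain mandate (addMandateClasses number_classes remain mandate)

-- ===== LEMMAS AND PROOFS =====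

-- the state either loop reaches, as a function of the set F of already-fired courses
def mkF (t : List Int → List Int) (F : String → Bool) (d : List (String × List Int)) : List (String × List Int) :=
  d.map (fun p => if F p.1 then (p.1, t p.2) else p)

theorem mkF_false (t : List Int → List Int) (d : List (String × List Int)) :
    mkF t (fun _ => false) d = d := by
  simp [mkF]

theorem mkF_congr (t : List Int → List Int) {F G : String → Bool} (h : ∀ x, F x = G x)
    (d : List (String × List Int)) : mkF t F d = mkF t G d :=
  List.map_congr_left (fun p _ => by rw [h])

theorem mkF_keys (t : List Int → List Int) (F : String → Bool) (d : List (String × List Int)) :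
    (mkF t F d).map Prod.fst = d.map Prod.fst := by
  unfold mkF; rw [List.map_map]
  exact List.map_congr_left (fun p _ => by by_cases h : F p.1 <;> simp [h])

theorem pvZeroV_nil : pvZeroV [] = [] := rfl

theorem pvHead_zeroV (v : List Int) : pvHead (pvZeroV v) = 0 := by
  cases v <;> simp [pvHead, pvZeroV, pysem]

theorem pvGet_mk2 (F : String → Bool) (d : List (String × List Int)) (c : String) :
    pvGet (mkF pvZeroV F d) c = if F c then pvZeroV (pvGet d c) else pvGet d c := by
  induction d with
  | nil => by_cases h : F c <;> simp [pvGet, mkF, h, pvZeroV_nil]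
  | cons p tl ih =>
    obtain ⟨k, v⟩ := p
    by_cases hk : k = c
    · subst hk; by_cases h : F k <;> simp [mkF, pvGet, h]
    · by_cases h : F k <;> simpa [mkF, pvGet, h, hk] using ih

theorem pvHead_mk2 (F : String → Bool) (d : List (String × List Int)) (c : String) :
    pvHead (pvGet (mkF pvZeroV F d) c) = if F c then 0 else pvHead (pvGet d c) := by
  rw [pvGet_mk2]; by_cases h : F c <;> simp [h, pvHead_zeroV]

theorem pvUpd_mkF (t : List Int → List Int) (F : String → Bool) (c : String)
    (d : List (String × List Int)) (hF : F c = false) (hnd : (d.map Prod.fst).Nodup) :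
    pvUpd (mkF t F d) c t = mkF t (fun x => F x || x == c) d := by
  induction d with
  | nil => simp [pvUpd, mkF]
  | cons p tl ih =>
    obtain ⟨k, v⟩ := p
    simp only [List.map_cons, List.nodup_cons] at hnd
    by_cases hk : k = c
    · subst hk
      have htail : List.map (fun p => if F p.1 = true then (p.1, t p.2) else p) tl
          = List.map (fun p => if (F p.1 || p.1 == k) = true then (p.1, t p.2) else p) tl :=
        List.map_congr_left (fun p hp => by
          have hpk : (p.1 == k) = false := by
            simp only [beq_eq_false_iff_ne]
            exact fun h => hnd.1 (h ▸ List.mem_map_of_mem hp)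
          simp [hpk])
      simp only [mkF, List.map_cons, hF, Bool.false_eq_true, if_false, pvUpd, Bool.false_or, BEq.rfl, if_pos, htail]
    · have hk' : (k == c) = false := by simp [hk]
      by_cases h : F k <;>
        simpa [mkF, pvUpd, h, hk, hk'] using ih hnd.2

-- one A-step, in fired-set form
theorem stepA_eq (nc rem : List (String × List Int)) (m c : String) (F : String → Bool)
    (h1 : (nc.map Prod.fst).Nodup) (h2 : (rem.map Prod.fst).Nodup) :
    addMandateClassesStep m (mkF pvBumpV F nc, mkF pvZeroV F rem) c
      = (mkF pvBumpV (fun x => F x || (x == c && ((m.toList ++ ['D'] == c.toList) || (m.toList ++ ['P'] == c.toList)) && (pvHead (pvGet rem c) != 0))) nc,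
         mkF pvZeroV (fun x => F x || (x == c && ((m.toList ++ ['D'] == c.toList) || (m.toList ++ ['P'] == c.toList)) && (pvHead (pvGet rem c) != 0))) rem) := by
  by_cases hFc : F c = true
  · have hh : pvHead (pvGet (mkF pvZeroV F rem) c) = 0 := by rw [pvHead_mk2, if_pos hFc]
    have hcongr : ∀ x, F x = (F x || (x == c && ((m.toList ++ ['D'] == c.toList) || (m.toList ++ ['P'] == c.toList)) && (pvHead (pvGet rem c) != 0))) := by
      intro x; by_cases hx : x = c
      · subst hx; simp [hFc]
      · simp [hx]
    have hL : addMandateClassesStep m (mkF pvBumpV F nc, mkF pvZeroV F rem) c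
        = (mkF pvBumpV F nc, mkF pvZeroV F rem) := by
      simp only [addMandateClassesStep, hh, bne_self_eq_false, Bool.and_false,
        Bool.false_eq_true, if_false]
    rw [hL, mkF_congr pvBumpV hcongr, mkF_congr pvZeroV hcongr]
  · have hFc' : F c = false := by simpa using hFc
    have hh : pvHead (pvGet (mkF pvZeroV F rem) c) = pvHead (pvGet rem c) := by
      rw [pvHead_mk2, if_neg (by simp [hFc'])]
    by_cases hD : (m.toList ++ ['D'] == c.toList) = true
    · have hDe : m.toList ++ ['D'] = c.toList := by simpa using hD
      have hP : (m.toList ++ ['P'] == c.toList) = false := by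
        rw [beq_eq_false_iff_ne]
        intro h
        have := List.append_inj_right (hDe.trans h.symm) rfl
        simp at this
      by_cases hz : (pvHead (pvGet rem c) != 0) = true
      · have hfun : ∀ x, (F x || x == c) = (F x || (x == c && ((m.toList ++ ['D'] == c.toList) || (m.toList ++ ['P'] == c.toList)) && (pvHead (pvGet rem c) != 0))) := by
          intro x; simp [hD, hz]
        have hL : addMandateClassesStep m (mkF pvBumpV F nc, mkF pvZeroV F rem) c
            = (pvUpd (mkF pvBumpV F nc) c pvBumpV, pvUpd (mkF pvZeroV F rem) c pvZeroV) := by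
          simp only [addMandateClassesStep, hh, hD, hz, Bool.true_and, Bool.and_true, if_true,
            hP, Bool.false_and, Bool.false_eq_true, if_false]
        rw [hL, pvUpd_mkF pvBumpV F c nc hFc' h1, pvUpd_mkF pvZeroV F c rem hFc' h2,
          mkF_congr pvBumpV hfun, mkF_congr pvZeroV hfun]
      · have hz' : (pvHead (pvGet rem c) != 0) = false := by simpa using hz
        have hcongr : ∀ x, F x = (F x || (x == c && ((m.toList ++ ['D'] == c.toList) || (m.toList ++ ['P'] == c.toList)) && (pvHead (pvGet rem c) != 0))) := by
          intro x; simp [hz']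
        have hL : addMandateClassesStep m (mkF pvBumpV F nc, mkF pvZeroV F rem) c
            = (mkF pvBumpV F nc, mkF pvZeroV F rem) := by
          simp only [addMandateClassesStep, hh, hz', Bool.and_false, Bool.false_eq_true, if_false]
        rw [hL, mkF_congr pvBumpV hcongr, mkF_congr pvZeroV hcongr]
    · have hD' : (m.toList ++ ['D'] == c.toList) = false := by simpa using hD
      by_cases hP : (m.toList ++ ['P'] == c.toList) = true
      · by_cases hz : (pvHead (pvGet rem c) != 0) = true
        · have hfun : ∀ x, (F x || x == c) = (F x || (x == c && ((m.toList ++ ['D'] == c.toList) || (m.toList ++ ['P'] == c.toList)) && (pvHead (pvGet rem c) != 0))) := by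
            intro x; simp [hP, hz]
          have hL : addMandateClassesStep m (mkF pvBumpV F nc, mkF pvZeroV F rem) c
              = (pvUpd (mkF pvBumpV F nc) c pvBumpV, pvUpd (mkF pvZeroV F rem) c pvZeroV) := by
            simp only [addMandateClassesStep, hh, hD', Bool.false_and, Bool.false_eq_true,
              if_false, hP, hz, Bool.and_true, Bool.true_and, if_true]
          rw [hL, pvUpd_mkF pvBumpV F c nc hFc' h1, pvUpd_mkF pvZeroV F c rem hFc' h2,
            mkF_congr pvBumpV hfun, mkF_congr pvZeroV hfun]
        · have hz' : (pvHead (pvGet rem c) != 0) = false := by simpa using hz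
          have hcongr : ∀ x, F x = (F x || (x == c && ((m.toList ++ ['D'] == c.toList) || (m.toList ++ ['P'] == c.toList)) && (pvHead (pvGet rem c) != 0))) := by
            intro x; simp [hz']
          have hL : addMandateClassesStep m (mkF pvBumpV F nc, mkF pvZeroV F rem) c
              = (mkF pvBumpV F nc, mkF pvZeroV F rem) := by
            simp only [addMandateClassesStep, hh, hz', Bool.and_false, Bool.false_eq_true, if_false]
          rw [hL, mkF_congr pvBumpV hcongr, mkF_congr pvZeroV hcongr]
      · have hP' : (m.toList ++ ['P'] == c.toList) = false := by simpa using hP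
        have hcongr : ∀ x, F x = (F x || (x == c && ((m.toList ++ ['D'] == c.toList) || (m.toList ++ ['P'] == c.toList)) && (pvHead (pvGet rem c) != 0))) := by
          intro x; simp [hD', hP']
        have hL : addMandateClassesStep m (mkF pvBumpV F nc, mkF pvZeroV F rem) c
            = (mkF pvBumpV F nc, mkF pvZeroV F rem) := by
          simp only [addMandateClassesStep, hD', hP', Bool.false_and, Bool.false_eq_true, if_false]
        rw [hL, mkF_congr pvBumpV hcongr, mkF_congr pvZeroV hcongr]

theorem foldA_inner (nc rem : List (String × List Int)) (m : String)
    (h1 : (nc.map Prod.fst).Nodup) (h2 : (rem.map Prod.fst).Nodup) :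
    ∀ (K : List String) (F : String → Bool),
    K.foldl (addMandateClassesStep m) (mkF pvBumpV F nc, mkF pvZeroV F rem)
      = (mkF pvBumpV (fun x => F x || (K.contains x && ((m.toList ++ ['D'] == x.toList) || (m.toList ++ ['P'] == x.toList)) && (pvHead (pvGet rem x) != 0))) nc,
         mkF pvZeroV (fun x => F x || (K.contains x && ((m.toList ++ ['D'] == x.toList) || (m.toList ++ ['P'] == x.toList)) && (pvHead (pvGet rem x) != 0))) rem) := by
  intro K
  induction K with
  | nil =>
    intro F
    have h : ∀ x, F x = (F x || (([] : List String).contains x && ((m.toList ++ ['D'] == x.toList) || (m.toList ++ ['P'] == x.toList)) && (pvHead (pvGet rem x) != 0))) := by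
      intro x; simp
    rw [List.foldl_nil, mkF_congr pvBumpV h, mkF_congr pvZeroV h]
  | cons c K' ih =>
    intro F
    rw [List.foldl_cons, stepA_eq nc rem m c F h1 h2, ih]
    have hcongr : ∀ x,
        ((F x || (x == c && ((m.toList ++ ['D'] == c.toList) || (m.toList ++ ['P'] == c.toList)) && (pvHead (pvGet rem c) != 0)))
          || (K'.contains x && ((m.toList ++ ['D'] == x.toList) || (m.toList ++ ['P'] == x.toList)) && (pvHead (pvGet rem x) != 0)))
        = (F x || ((c :: K').contains x && ((m.toList ++ ['D'] == x.toList) || (m.toList ++ ['P'] == x.toList)) && (pvHead (pvGet rem x) != 0))) := by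
      intro x
      by_cases hx : x = c
      · subst hx
        cases hF : F x <;> cases hK : K'.contains x <;>
          cases hD : (m.toList ++ ['D'] == x.toList) <;> cases hP : (m.toList ++ ['P'] == x.toList) <;>
          cases hz : (pvHead (pvGet rem x) != 0) <;>
          simp [hF, hK, hD, hP, hz, List.contains_cons]
      · have hx' : (x == c) = false := by simp [hx]
        simp [hx', List.contains_cons, hx]
    rw [mkF_congr pvBumpV hcongr, mkF_congr pvZeroV hcongr]

theorem foldA_outer (nc rem : List (String × List Int))
    (h1 : (nc.map Prod.fst).Nodup) (h2 : (rem.map Prod.fst).Nodup) :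
    ∀ (M : List String) (F : String → Bool),
    M.foldl (fun st m => (st.2.map Prod.fst).foldl (addMandateClassesStep m) st)
        (mkF pvBumpV F nc, mkF pvZeroV F rem)
      = (mkF pvBumpV (fun x => F x || M.any (fun m => ((rem.map Prod.fst).contains x && ((m.toList ++ ['D'] == x.toList) || (m.toList ++ ['P'] == x.toList)) && (pvHead (pvGet rem x) != 0)))) nc,
         mkF pvZeroV (fun x => F x || M.any (fun m => ((rem.map Prod.fst).contains x && ((m.toList ++ ['D'] == x.toList) || (m.toList ++ ['P'] == x.toList)) && (pvHead (pvGet rem x) != 0)))) rem) := by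
  intro M
  induction M with
  | nil =>
    intro F
    have h : ∀ x, F x = (F x || ([] : List String).any (fun m => ((rem.map Prod.fst).contains x && ((m.toList ++ ['D'] == x.toList) || (m.toList ++ ['P'] == x.toList)) && (pvHead (pvGet rem x) != 0)))) := by
      intro x; simp
    rw [List.foldl_nil, mkF_congr pvBumpV h, mkF_congr pvZeroV h]
  | cons m M' ih =>
    intro F
    rw [List.foldl_cons]
    rw [show ((mkF pvBumpV F nc, mkF pvZeroV F rem) : (List (String × List Int)) × (List (String × List Int))).2.map Prod.fst = rem.map Prod.fst from mkF_keys pvZeroV F rem]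
    rw [foldA_inner nc rem m h1 h2 (rem.map Prod.fst) F, ih]
    have hcongr : ∀ x,
        ((F x || ((rem.map Prod.fst).contains x && ((m.toList ++ ['D'] == x.toList) || (m.toList ++ ['P'] == x.toList)) && (pvHead (pvGet rem x) != 0)))
          || M'.any (fun m => ((rem.map Prod.fst).contains x && ((m.toList ++ ['D'] == x.toList) || (m.toList ++ ['P'] == x.toList)) && (pvHead (pvGet rem x) != 0))))
        = (F x || (m :: M').any (fun m => ((rem.map Prod.fst).contains x && ((m.toList ++ ['D'] == x.toList) || (m.toList ++ ['P'] == x.toList)) && (pvHead (pvGet rem x) != 0)))) := by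
      intro x
      simp [List.any_cons, Bool.or_assoc]
    rw [mkF_congr pvBumpV hcongr, mkF_congr pvZeroV hcongr]

-- B's stage-2 loop over an already-computed duplicate-free list of courses, in fired-set form
theorem foldB_upd (nc rem : List (String × List Int))
    (h1 : (nc.map Prod.fst).Nodup) (h2 : (rem.map Prod.fst).Nodup) :
    ∀ (L : List String) (F : String → Bool), L.Nodup → (∀ c ∈ L, F c = false) →
    L.foldl (fun st c => (pvUpd st.1 c pvBumpV, pvUpd st.2 c pvZeroV)) (mkF pvBumpV F nc, mkF pvZeroV F rem)
      = (mkF pvBumpV (fun x => F x || L.contains x) nc, mkF pvZeroV (fun x => F x || L.contains x) rem) := by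
  intro L
  induction L with
  | nil =>
    intro F _ _
    have h : ∀ x, F x = (F x || ([] : List String).contains x) := by intro x; simp
    rw [List.foldl_nil, mkF_congr pvBumpV h, mkF_congr pvZeroV h]
  | cons c L' ih =>
    intro F hnd hF
    have hFc : F c = false := hF c (List.mem_cons_self ..)
    rw [List.foldl_cons]
    have hstep : ((pvUpd (mkF pvBumpV F nc) c pvBumpV, pvUpd (mkF pvZeroV F rem) c pvZeroV)
        : (List (String × List Int)) × (List (String × List Int)))
        = (mkF pvBumpV (fun x => F x || x == c) nc, mkF pvZeroV (fun x => F x || x == c) rem) := by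
      rw [pvUpd_mkF pvBumpV F c nc hFc h1, pvUpd_mkF pvZeroV F c rem hFc h2]
    rw [hstep, ih (fun x => F x || x == c) (List.nodup_cons.mp hnd).2
      (fun c' hc' => by
        have h1' := hF c' (List.mem_cons_of_mem _ hc')
        have h2' : (c' == c) = false := by
          simp only [beq_eq_false_iff_ne]
          exact fun h => (List.nodup_cons.mp hnd).1 (h ▸ hc')
        simp [h1', h2'])]
    have hcongr : ∀ x, ((F x || x == c) || L'.contains x) = (F x || (c :: L').contains x) := by
      intro x; rw [Bool.eq_iff_iff]; simp [Bool.or_assoc]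
    rw [mkF_congr pvBumpV hcongr, mkF_congr pvZeroV hcongr]

-- the key pointwise fact: A's double equality scan fires at x exactly when B's suffix/set test does
theorem cond_bridge (mandate : List String) (x : String) :
    mandate.any (fun m => (m.toList ++ ['D'] == x.toList) || (m.toList ++ ['P'] == x.toList))
      = ((PySem.Str.endswith x "D" || PySem.Str.endswith x "P") && PySem.Set.contains (PySem.Set.ofList mandate) (PySem.Str.slice x none (some (-1)))) := by
  have hDlit : ("D" : String).toList = ['D'] := rfl
  have hPlit : ("P" : String).toList = ['P'] := rfl
  rw [Bool.eq_iff_iff]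
  simp only [List.any_eq_true, Bool.or_eq_true, Bool.and_eq_true, beq_iff_eq,
    PySem.Str.endswith_eq, hDlit, hPlit, PySem.Set.contains_iff, PySem.Set.mem_ofList]
  constructor
  · rintro ⟨m, hm, h | h⟩
    · have hslice : PySem.Str.slice x none (some (-1)) = m := by
        apply String.toList_inj.mp
        rw [PySem.Str.slice_to_neg_one, ← h, List.dropLast_concat]
      exact ⟨Or.inl ((PySem.Chars.endswith_iff _ _).mpr ⟨m.toList, h⟩), hslice ▸ hm⟩
    · have hslice : PySem.Str.slice x none (some (-1)) = m := by
        apply String.toList_inj.mp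
        rw [PySem.Str.slice_to_neg_one, ← h, List.dropLast_concat]
      exact ⟨Or.inr ((PySem.Chars.endswith_iff _ _).mpr ⟨m.toList, h⟩), hslice ▸ hm⟩
  · rintro ⟨hend, hmem⟩
    refine ⟨PySem.Str.slice x none (some (-1)), hmem, ?_⟩
    rcases hend with h | h
    · obtain ⟨t, ht⟩ := (PySem.Chars.endswith_iff _ _).mp h
      left
      rw [PySem.Str.slice_to_neg_one, ← ht, List.dropLast_concat]
    · obtain ⟨t, ht⟩ := (PySem.Chars.endswith_iff _ _).mp h
      right
      rw [PySem.Str.slice_to_neg_one, ← ht, List.dropLast_concat]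

-- ===== VERDICT (by name: the statement is the Claim_ definition above) =====
theorem addMandateClasses_spec : Claim_equal_addMandateClasses := by
  intro nc rem mandate _ hpre
  obtain ⟨h1, h2, _⟩ := hpre
  unfold Spec_addMandateClasses addMandateClasses addMandateClasses_alt
  rw [show ((nc, rem) : (List (String × List Int)) × (List (String × List Int)))
        = (mkF pvBumpV (fun _ => false) nc, mkF pvZeroV (fun _ => false) rem) from by
      rw [mkF_false, mkF_false]]
  have hfnd : (addMandateClassesFired rem (PySem.Set.ofList mandate)).Nodup :=
    List.Nodup.filter _ h2
  rw [foldA_outer nc rem h1 h2 mandate (fun _ => false),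
      foldB_upd nc rem h1 h2 (addMandateClassesFired rem (PySem.Set.ofList mandate))
        (fun _ => false) hfnd (fun _ _ => rfl)]
  have hfired : ∀ x, (addMandateClassesFired rem (PySem.Set.ofList mandate)).contains x
      = ((rem.map Prod.fst).contains x
         && ((PySem.Str.endswith x "D" || PySem.Str.endswith x "P")
             && PySem.Set.contains (PySem.Set.ofList mandate) (PySem.Str.slice x none (some (-1))))
         && (pvHead (pvGet rem x) != 0)) := by
    intro x
    rw [Bool.eq_iff_iff]
    simp [addMandateClassesFired, List.mem_filter, and_assoc]
  have hcongr : ∀ x,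
      ((fun (_ : String) => false) x || mandate.any (fun m => ((rem.map Prod.fst).contains x && ((m.toList ++ ['D'] == x.toList) || (m.toList ++ ['P'] == x.toList)) && (pvHead (pvGet rem x) != 0))))
      = ((fun (_ : String) => false) x || (addMandateClassesFired rem (PySem.Set.ofList mandate)).contains x) := by
    intro x
    have hpull : mandate.any (fun m => ((rem.map Prod.fst).contains x && ((m.toList ++ ['D'] == x.toList) || (m.toList ++ ['P'] == x.toList)) && (pvHead (pvGet rem x) != 0)))
        = ((rem.map Prod.fst).contains x && mandate.any (fun m => ((m.toList ++ ['D'] == x.toList) || (m.toList ++ ['P'] == x.toList))) && (pvHead (pvGet rem x) != 0)) := by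
      cases hK : (rem.map Prod.fst).contains x <;> cases hz : (pvHead (pvGet rem x) != 0) <;>
        simp [hK, hz]
    simp only [Bool.false_or]
    rw [hpull, cond_bridge, hfired]
  rw [mkF_congr pvBumpV hcongr, mkF_congr pvZeroV hcongr]
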